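-- pv_equiv track=rewrite | github.com/ankit-0044/Python | Python/Question Solve/Last third consonant from string.py | third_consonant
-- ===== SOURCE A (Python) =====
-- def third_consonant(str):
--     c = 0
--     ans = ''
--     for i in range(len(str)-1,-1,-1):
--         if (c < 3 and (not str[i]=='a') and (not str[i]=='e') and (not str[i]=='i') and (not str[i]=='o') and (not str[i]=='u')):
--             ans = str[i]
--             c += 1
--
--     return ans
-- ===== SOURCE B (Python) =====
-- def third_consonant(str):
--     cons = [ch for ch in str if ch not in 'aeiou']
--     if not cons:
--         return ''
--     return cons[-3] if len(cons) >= 3 else cons[0]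
-- ===== Notes on version B (the rewrite author's own statement) =====
-- stated objective: simpler
-- what changed: Replaces the backward index scan with a 3-capped counter and running answer by building the forward consonant list once and indexing it directly (cons[-3] when at least three consonants, else cons[0]).
import Mathlib
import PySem

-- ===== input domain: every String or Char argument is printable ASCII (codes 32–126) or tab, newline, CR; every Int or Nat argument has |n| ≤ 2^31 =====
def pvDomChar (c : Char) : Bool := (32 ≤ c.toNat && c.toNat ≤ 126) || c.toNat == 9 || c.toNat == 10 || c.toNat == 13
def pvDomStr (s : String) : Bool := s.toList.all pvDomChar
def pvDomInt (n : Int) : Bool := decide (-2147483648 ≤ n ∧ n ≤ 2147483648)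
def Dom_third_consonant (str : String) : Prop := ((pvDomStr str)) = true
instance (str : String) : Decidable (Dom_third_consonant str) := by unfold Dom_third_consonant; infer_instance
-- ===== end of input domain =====

-- B replaces A's backward scan with a capped counter by building the forward consonant
-- list once and indexing it (cons[-3] when three or more consonants, else cons[0]); objective: simpler.

-- ===== PORT A =====
-- step of A's loop body (state = (c, ans))
def tcStepA (p : Int × String) (ch : Char) : Int × String :=
  if p.1 < 3 ∧ ¬(ch = 'a') ∧ ¬(ch = 'e') ∧ ¬(ch = 'i') ∧ ¬(ch = 'o') ∧ ¬(ch = 'u')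
  then (p.1 + 1, String.ofList [ch]) else p

def third_consonant (str : String) : String :=
  ((PySem.List.pyRange ((str.toList.length : Int) - 1) (-1) (-1)).foldl
    (fun p i => tcStepA p (PySem.List.pyGetD str.toList i ' ')) (0, "")).2

-- ===== PORT B =====
def third_consonant_alt (str : String) : String :=
  let cons := str.toList.filter (fun ch => decide (ch ∉ ['a', 'e', 'i', 'o', 'u']))
  if cons = [] then ""
  else if 3 ≤ cons.length then
    match PySem.List.pyGet? cons (-3) with
    | some ch => String.ofList [ch]
    | none => ""
  else
    match PySem.List.pyGet? cons 0 with
    | some ch => String.ofList [ch]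
    | none => ""

-- ===== PRECONDITION & SPEC =====
def Spec_third_consonant (str : String) (out : String) : Prop := out = third_consonant_alt str
instance (str : String) (out : String) : Decidable (Spec_third_consonant str out) := by unfold Spec_third_consonant; infer_instance

-- ===== CLAIM (what is proved, stated in full; the proofs are below) =====
def Claim_equal_third_consonant : Prop := ∀ (str : String), Dom_third_consonant str → Spec_third_consonant str (third_consonant str)

-- ===== LEMMAS AND PROOFS =====

def tcCons (ch : Char) : Bool := decide (ch ∉ ['a', 'e', 'i', 'o', 'u'])

theorem tcGetLast?_cons_ne {α : Type} (x : α) (t : List α) (h : t ≠ []) :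
    (x :: t).getLast? = t.getLast? := by
  cases t with
  | nil => exact absurd rfl h
  | cons y ys => exact List.getLast?_cons_cons

theorem tcStepA_of_ge (l : List Char) (p : Int × String) (h : 3 ≤ p.1) :
    l.foldl tcStepA p = p := by
  induction l generalizing p with
  | nil => rfl
  | cons ch t ih =>
    simp only [List.foldl_cons]
    rw [show tcStepA p ch = p by unfold tcStepA; simp [show ¬ (p.1 < 3) by omega]]
    exact ih p h

theorem tcFoldA_snd (l : List Char) (c : Int) (ans : String)
    (h0 : 0 ≤ c) (h3 : c < 3) :
    (l.foldl tcStepA (c, ans)).2 =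
      ((((l.filter tcCons).take (3 - c).toNat).getLast?).map
        (fun ch => String.ofList [ch])).getD ans := by
  induction l generalizing c ans with
  | nil => simp
  | cons ch t ih =>
    by_cases hc : tcCons ch = true
    · have hcond : tcStepA (c, ans) ch = (c + 1, String.ofList [ch]) := by
        unfold tcStepA
        simp only [tcCons, List.mem_cons, List.not_mem_nil,
          decide_eq_true_eq] at hc
        simp only []
        rw [if_pos]
        refine ⟨h3, ?_, ?_, ?_, ?_, ?_⟩ <;> tauto
      simp only [List.foldl_cons, hcond, List.filter_cons, hc, if_pos]
      have htk : (3 - c).toNat = (2 - c).toNat + 1 := by omega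
      rw [htk, List.take_succ_cons]
      by_cases hc1 : c + 1 < 3
      · rw [ih (c + 1) (String.ofList [ch]) (by omega) hc1]
        have : (3 - (c + 1)).toNat = (2 - c).toNat := by omega
        rw [this]
        cases hlast : (List.take (2 - c).toNat (t.filter tcCons)).getLast? with
        | none =>
          have : List.take (2 - c).toNat (t.filter tcCons) = [] :=
            List.getLast?_eq_none_iff.mp hlast
          simp [this]
        | some x =>
          have hne : List.take (2 - c).toNat (t.filter tcCons) ≠ [] := by
            intro h; rw [h] at hlast; simp at hlast
          rw [tcGetLast?_cons_ne ch _ hne, hlast]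
          simp
      · have hc3 : c = 2 := by omega
        subst hc3
        rw [tcStepA_of_ge t (2 + 1, String.ofList [ch]) (by norm_num)]
        simp
    · have hvow : ch = 'a' ∨ ch = 'e' ∨ ch = 'i' ∨ ch = 'o' ∨ ch = 'u' := by
        simp only [tcCons, List.mem_cons, List.not_mem_nil,
          decide_eq_true_eq] at hc
        tauto
      have hcond : tcStepA (c, ans) ch = (c, ans) := by
        unfold tcStepA
        simp only []
        rw [if_neg]
        rintro ⟨-, h1, h2, h3', h4, h5⟩
        rcases hvow with h | h | h | h | h <;> simp_all
      simp only [List.foldl_cons, hcond, List.filter_cons]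
      rw [if_neg (by simp [hc])]
      exact ih c ans h0 h3

-- the final pure-list comparison: A's backward-scan answer vs B's indexing, on ks = forward consonant list
theorem tcCompare (ks : List Char) :
    ((((ks.reverse.take 3).getLast?).map (fun ch => String.ofList [ch])).getD "") =
      (if ks = [] then ""
       else if 3 ≤ ks.length then
         match PySem.List.pyGet? ks (-3) with
         | some ch => String.ofList [ch]
         | none => ""
       else
         match PySem.List.pyGet? ks 0 with
         | some ch => String.ofList [ch]
         | none => "") := by
  by_cases hnil : ks = []
  · simp [hnil]
  · rw [if_neg hnil]
    by_cases h3 : 3 ≤ ks.length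
    · rw [if_pos h3]
      have hget : PySem.List.pyGet? ks (-3) = ks[ks.length - 3]? := by
        rw [PySem.List.pyGet?_neg_ofNat ks 3 (by omega) h3]
      have hlen : (ks.reverse.take 3).length = 3 := by
        simp [List.length_take]; omega
      have hlast : (ks.reverse.take 3).getLast? = (ks.reverse.take 3)[2]? := by
        rw [List.getLast?_eq_getElem?, hlen]
      rw [hlast, List.getElem?_take]
      simp only [show (2 < 3) = True by simp]
      rw [List.getElem?_reverse (by omega)]
      have : ks.length - 1 - 2 = ks.length - 3 := by omega
      rw [this, hget]
      cases hx : ks[ks.length - 3]? with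
      | none =>
        exfalso
        have := List.getElem?_eq_none_iff.mp hx
        omega
      | some x => simp
    · rw [if_neg h3]
      have htk : ks.reverse.take 3 = ks.reverse :=
        List.take_of_length_le (by simp; omega)
      rw [htk, List.getLast?_reverse]
      have hget : PySem.List.pyGet? ks 0 = ks[0]? := by
        simp [PySem.List.pyGet?_zero]
      rw [hget, ← List.head?_eq_getElem?]
      cases hx : ks.head? with
      | none => exact absurd (List.head?_eq_none_iff.mp hx) hnil
      | some x => simp

theorem third_consonant_spec : Claim_equal_third_consonant := by
  intro s _
  unfold Spec_third_consonant third_consonant third_consonant_alt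
  rw [PySem.List.pyRange_neg_one_eq_reverse]
  have h01 : (-1 : Int) + 1 = 0 := by norm_num
  have h02 : (s.toList.length : Int) - 1 + 1 = (s.toList.length : Int) := by ring
  rw [h01, h02]
  rw [← List.foldl_map (f := fun i => PySem.List.pyGetD s.toList i ' ') (g := tcStepA)]
  rw [List.map_reverse]
  rw [PySem.List.map_pyGetD_pyRange_zero' s.toList ' ']
  rw [tcFoldA_snd s.toList.reverse 0 "" (by norm_num) (by norm_num)]
  have hfr : s.toList.reverse.filter tcCons = (s.toList.filter tcCons).reverse := by
    rw [List.filter_reverse]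
  rw [hfr]
  simp only [show (3 - (0:Int)).toNat = 3 by decide]
  exact tcCompare (s.toList.filter tcCons)
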